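-- pv_equiv track=rewrite | github.com/cha725/endomorphism_rings | bitmask_subgraph.py | _dim_of_mask
-- ===== SOURCE A (Python) =====
-- def _dim_of_mask(mask: int) -> int:
--     """ Returns the number of vertices represented by the mask. """
--     remaining = mask
--     dim = 0
--     while remaining:
--         vertex = remaining & -remaining
--         remaining &= ~vertex
--         dim += 1
--     return dim
-- ===== SOURCE B (Python) =====
-- def _dim_of_mask(mask: int) -> int:
--     """ Returns the number of vertices represented by the mask. """
--     m = mask
--     count = 0
--     while m:
--         count += m & 1
--         m >>= 1
--     return count
-- ===== Notes on version B (the rewrite author's own statement) =====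
-- stated objective: alternative
-- what changed: B counts bits by testing the low bit and right-shifting the whole mask each step, instead of isolating the lowest set bit with mask & -mask and clearing it; the loop state is a shifting register plus counter, not a shrinking set of set bits.
import Mathlib
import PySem

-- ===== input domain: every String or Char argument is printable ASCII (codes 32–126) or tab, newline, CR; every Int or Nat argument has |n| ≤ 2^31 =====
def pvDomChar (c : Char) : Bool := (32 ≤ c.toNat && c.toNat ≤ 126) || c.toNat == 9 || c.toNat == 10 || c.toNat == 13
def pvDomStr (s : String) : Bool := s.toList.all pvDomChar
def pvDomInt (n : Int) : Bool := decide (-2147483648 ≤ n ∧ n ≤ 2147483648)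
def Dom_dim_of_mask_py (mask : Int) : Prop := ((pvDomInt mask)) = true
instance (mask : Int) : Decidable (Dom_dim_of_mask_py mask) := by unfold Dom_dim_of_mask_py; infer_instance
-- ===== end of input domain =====

-- B counts bits by testing the low bit and right-shifting the mask, instead of
-- repeatedly isolating the lowest set bit with mask & -mask and clearing it (objective: alternative).

-- termination helper for port A's loop: clearing the lowest set bit of a positive int shrinks it
theorem pvStepA_lt (r : Int) (h : ¬ r ≤ 0) :
    (Int.land r (Int.lnot (Int.land r (-r)))).toNat < r.toNat := by
  obtain ⟨n, rfl⟩ := Int.eq_ofNat_of_zero_le (le_of_lt (lt_of_not_ge h))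
  cases n with
  | zero => exact absurd le_rfl h
  | succ k =>
    show (Int.ofNat (Nat.ldiff (k+1) (Nat.ldiff (k+1) k))).toNat < (Int.ofNat (k+1)).toNat
    have h2 : Nat.ldiff (k+1) (Nat.ldiff (k+1) k) = (k+1) &&& k := by
      apply Nat.eq_of_testBit_eq; intro i
      simp only [Nat.testBit_ldiff, Nat.testBit_land]
      cases (k+1).testBit i <;> cases k.testBit i <;> rfl
    show Nat.ldiff (k+1) (Nat.ldiff (k+1) k) < k + 1
    rw [h2]
    exact Nat.lt_succ_of_le Nat.and_le_right

-- termination helper for port B's loop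
theorem pvStepB_lt (m : Int) (h : ¬ m ≤ 0) : (Int.shiftRight m 1).toNat < m.toNat := by
  obtain ⟨n, rfl⟩ := Int.eq_ofNat_of_zero_le (le_of_lt (lt_of_not_ge h))
  cases n with
  | zero => exact absurd le_rfl h
  | succ k =>
    show (k+1) >>> 1 < k + 1
    rw [Nat.shiftRight_one]
    omega

-- ===== PORT A =====
-- 'while remaining:' tests remaining ≠ 0; for remaining < 0 the Python loop never terminates,
-- so those inputs are outside Pre_ and the guard here stops at ≤ 0.
def pvDimLoopA (remaining : Int) (dim : Int) : Int :=
  if h : remaining ≤ 0 then dim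
  else
    let vertex := Int.land remaining (-remaining)
    pvDimLoopA (Int.land remaining (Int.lnot vertex)) (dim + 1)
termination_by remaining.toNat
decreasing_by exact pvStepA_lt remaining h

def dim_of_mask_py (mask : Int) : Int := pvDimLoopA mask 0

-- ===== PORT B =====
-- same remark: Python diverges for negative m, excluded by Pre_.
def pvDimLoopB (m : Int) (count : Int) : Int :=
  if h : m ≤ 0 then count
  else pvDimLoopB (Int.shiftRight m 1) (count + Int.land m 1)
termination_by m.toNat
decreasing_by exact pvStepB_lt m h

def dim_of_mask_py_alt (mask : Int) : Int := pvDimLoopB mask 0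

-- ===== PRECONDITION & SPEC =====
-- Pre_ excludes negative masks: there BOTH Pythons loop forever ('while remaining:' never ends
-- on a negative int), so A returns on exactly the inputs admitted here.
def Pre_dim_of_mask_py (mask : Int) : Prop := 0 ≤ mask
instance (mask : Int) : Decidable (Pre_dim_of_mask_py mask) := by unfold Pre_dim_of_mask_py; infer_instance
def pvWitness_dim_of_mask_py : Int := (13)
def Spec_dim_of_mask_py (mask : Int) (out : Int) : Prop := out = dim_of_mask_py_alt mask
instance (mask : Int) (out : Int) : Decidable (Spec_dim_of_mask_py mask out) := by unfold Spec_dim_of_mask_py; infer_instance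

-- ===== CLAIM (what is proved, stated in full; the proofs are below) =====
def Claim_equal_dim_of_mask_py : Prop := ∀ (mask : Int), Dom_dim_of_mask_py mask → Pre_dim_of_mask_py mask → Spec_dim_of_mask_py mask (dim_of_mask_py mask)

-- ===== LEMMAS AND PROOFS =====

-- reference popcount on Nat
def pvPc (k : Nat) : Nat :=
  if k = 0 then 0 else pvPc (k / 2) + k % 2
termination_by k
decreasing_by omega

theorem pvPc_two_mul (q : Nat) : pvPc (2 * q) = pvPc q := by
  rcases Nat.eq_zero_or_pos q with h | h
  · subst h; rfl
  · rw [pvPc]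
    simp only [if_neg (by omega : ¬ 2 * q = 0)]
    have h1 : 2 * q / 2 = q := by omega
    have h2 : 2 * q % 2 = 0 := by omega
    rw [h1, h2]
    omega

-- clearing the lowest set bit: k &&& (k-1), and its popcount drops by one
theorem pvLand_pred_odd (k : Nat) (h : k % 2 = 1) : k &&& (k - 1) = k - 1 := by
  apply Nat.eq_of_testBit_eq; intro i
  cases i with
  | zero =>
    simp only [Nat.testBit_zero]
    have : (k - 1) % 2 = 0 := by omega
    simp [this]
  | succ j =>
    rw [Nat.testBit_land]
    simp only [Nat.testBit_succ]
    have : (k - 1) / 2 = k / 2 := by omega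
    rw [this]
    cases (k / 2).testBit j <;> rfl

theorem pvLand_pred_even (q : Nat) (hq : 0 < q) :
    (2 * q) &&& (2 * q - 1) = 2 * (q &&& (q - 1)) := by
  apply Nat.eq_of_testBit_eq; intro i
  cases i with
  | zero =>
    simp only [Nat.testBit_zero]
    have h1 : 2 * q % 2 = 0 := by omega
    have h2 : 2 * (q &&& (q - 1)) % 2 = 0 := by omega
    simp [h1, h2]
  | succ j =>
    rw [Nat.testBit_land]
    simp only [Nat.testBit_succ]
    have h1 : 2 * q / 2 = q := by omega
    have h2 : (2 * q - 1) / 2 = q - 1 := by omega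
    have h3 : 2 * (q &&& (q - 1)) / 2 = q &&& (q - 1) := by omega
    rw [h1, h2, h3, Nat.testBit_land]

theorem pvPc_land_pred (k : Nat) (h : 0 < k) : pvPc (k &&& (k - 1)) + 1 = pvPc k := by
  induction k using Nat.strong_induction_on with
  | _ k ih =>
    rcases Nat.even_or_odd k with ⟨q, hq⟩ | ⟨q, hq⟩
    · -- k = 2*q, q > 0
      have hq2 : k = 2 * q := by omega
      have hqpos : 0 < q := by omega
      subst hq2
      rw [pvLand_pred_even q hqpos, pvPc_two_mul, pvPc_two_mul]
      exact ih q (by omega) hqpos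
    · -- k odd
      have hk1 : k % 2 = 1 := by omega
      rw [pvLand_pred_odd k hk1]
      have e0 : pvPc 0 = 0 := by rw [pvPc]; rfl
      rcases Nat.eq_or_lt_of_le h with h1 | h1
      · cases h1
        have e1 : pvPc 1 = 1 := by rw [pvPc]; simp [e0]
        simpa [e0] using e1.symm
      · have hke : (k - 1) = 2 * q := by omega
        rw [hke, pvPc_two_mul]
        conv_rhs => rw [pvPc]
        simp only [if_neg (by omega : ¬ k = 0)]
        have : k / 2 = q := by omega
        rw [this, hk1]

theorem pvDimLoopA_eq (k : Nat) (d : Int) : pvDimLoopA (Int.ofNat k) d = d + (pvPc k : Int) := by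
  induction k using Nat.strong_induction_on generalizing d with
  | _ k ih =>
    cases k with
    | zero => rw [pvDimLoopA]; simp [pvPc]
    | succ j =>
      rw [pvDimLoopA]
      have hnot : ¬ (Int.ofNat (j+1) ≤ 0) := by
        simp only [Int.ofNat_eq_natCast]; omega
      rw [dif_neg hnot]
      have hred : Int.land (Int.ofNat (j+1)) (Int.lnot (Int.land (Int.ofNat (j+1)) (-(Int.ofNat (j+1)))))
          = Int.ofNat (Nat.ldiff (j+1) (Nat.ldiff (j+1) j)) := rfl
      have hland : Nat.ldiff (j+1) (Nat.ldiff (j+1) j) = (j+1) &&& j := by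
        apply Nat.eq_of_testBit_eq; intro i
        simp only [Nat.testBit_ldiff, Nat.testBit_land]
        cases (j+1).testBit i <;> cases j.testBit i <;> rfl
      simp only [hred, hland]
      have hlt : (j+1) &&& j < j + 1 := Nat.lt_succ_of_le Nat.and_le_right
      rw [ih ((j+1) &&& j) hlt (d+1)]
      have := pvPc_land_pred (j+1) (Nat.succ_pos j)
      have hj : (j + 1) - 1 = j := rfl
      rw [hj] at this
      omega

theorem pvDimLoopB_eq (k : Nat) (c : Int) : pvDimLoopB (Int.ofNat k) c = c + (pvPc k : Int) := by
  induction k using Nat.strong_induction_on generalizing c with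
  | _ k ih =>
    cases k with
    | zero => rw [pvDimLoopB]; simp [pvPc]
    | succ j =>
      rw [pvDimLoopB]
      have hnot : ¬ (Int.ofNat (j+1) ≤ 0) := by
        simp only [Int.ofNat_eq_natCast]; omega
      rw [dif_neg hnot]
      have hshift : Int.shiftRight (Int.ofNat (j+1)) 1 = Int.ofNat ((j+1) / 2) := by
        show Int.ofNat ((j+1) >>> 1) = Int.ofNat ((j+1) / 2)
        rw [Nat.shiftRight_one]
      have hland : Int.land (Int.ofNat (j+1)) 1 = Int.ofNat ((j+1) % 2) := by
        show Int.ofNat ((j+1) &&& 1) = Int.ofNat ((j+1) % 2)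
        rw [Nat.and_one_is_mod]
      rw [hshift, hland, ih ((j+1)/2) (by omega) (c + Int.ofNat ((j+1) % 2))]
      conv_rhs => rw [pvPc]
      simp only [if_neg (Nat.succ_ne_zero j), Int.ofNat_eq_natCast]
      push_cast
      omega

-- ===== VERDICT (by name: the statement is the Claim_ definition above) =====
theorem dim_of_mask_py_spec : Claim_equal_dim_of_mask_py := by
  intro mask _ hpre
  obtain ⟨k, rfl⟩ := Int.eq_ofNat_of_zero_le hpre
  show pvDimLoopA (Int.ofNat k) 0 = pvDimLoopB (Int.ofNat k) 0
  rw [pvDimLoopA_eq, pvDimLoopB_eq]
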